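-- pv_equiv track=rewrite | github.com/mangandajmz/ai-holding-company | health/division_health.py | _compute_status
-- ===== SOURCE A (Python) =====
-- from typing import Any
--
-- _CRITICAL_SIGNALS: dict[str, frozenset[str]] = {
--     "trading": frozenset({"MT5 dependencies", "Polymarket VPS service"}),
--     "websites": frozenset({"Website availability snapshot", "DNS + TCP(443) reachability"}),
-- }
--
-- def _compute_status(signals: list[dict[str, Any]], division: str) -> str:
--     """Derive GREEN / AMBER / RED from a list of signals.
--
--     Rules:
--       RED   — any critical signal failing, OR ≥ 2 signals failing.
--       AMBER — exactly 1 non-critical signal failing.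
--       GREEN — all signals pass.
--     """
--     critical = _CRITICAL_SIGNALS.get(division, frozenset())
--     failing = [s for s in signals if s.get("result") == "fail"]
--     if not failing:
--         return "GREEN"
--     critical_failures = [s for s in failing if s["name"] in critical]
--     if critical_failures or len(failing) >= 2:
--         return "RED"
--     return "AMBER"
-- ===== SOURCE B (Python) =====
-- from typing import Any
--
-- _CRITICAL_SIGNALS: dict[str, frozenset[str]] = {
--     "trading": frozenset({"MT5 dependencies", "Polymarket VPS service"}),
--     "websites": frozenset({"Website availability snapshot", "DNS + TCP(443) reachability"}),
-- }
--
-- def _compute_status(signals: list[dict[str, Any]], division: str) -> str: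
--     """Severity-scoring formulation: each signal gets a numeric severity
--     (pass -> 0, non-critical fail -> 1, critical fail -> 2); the statuses are
--     thresholds of the total severity (0 -> GREEN, >= 2 -> RED, 1 -> AMBER)."""
--     critical = _CRITICAL_SIGNALS.get(division, frozenset())
--
--     def severity(s: dict[str, Any]) -> int:
--         if s.get("result") != "fail":
--             return 0
--         return 2 if s["name"] in critical else 1
--
--     total = sum(map(severity, signals))
--     if total == 0:
--         return "GREEN"
--     return "RED" if total >= 2 else "AMBER"
-- ===== Notes on version B (the rewrite author's own statement) =====
-- stated objective: alternative
-- what changed: Replaces A's staged filter lists and boolean or-of-conditions by a per-signal numeric severity score (pass 0, non-critical fail 1, critical fail 2) summed once and thresholded (0 GREEN, >=2 RED, 1 AMBER).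
import Mathlib
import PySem

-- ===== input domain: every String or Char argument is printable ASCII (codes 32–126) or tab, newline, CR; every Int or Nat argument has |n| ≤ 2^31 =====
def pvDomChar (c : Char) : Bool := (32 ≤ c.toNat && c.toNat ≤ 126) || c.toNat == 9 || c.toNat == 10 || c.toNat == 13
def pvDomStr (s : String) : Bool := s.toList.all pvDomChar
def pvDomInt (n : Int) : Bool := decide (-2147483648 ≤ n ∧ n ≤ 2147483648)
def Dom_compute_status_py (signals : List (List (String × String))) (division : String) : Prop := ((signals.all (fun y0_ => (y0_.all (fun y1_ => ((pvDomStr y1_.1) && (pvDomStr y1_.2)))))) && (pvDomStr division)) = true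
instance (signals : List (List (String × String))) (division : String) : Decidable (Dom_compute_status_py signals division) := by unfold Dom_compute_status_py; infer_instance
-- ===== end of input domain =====

-- B replaces A's staged filter lists by a summed per-signal severity score (0/1/2) with
-- thresholds; same O(n) cost, a different (arithmetical) decomposition.

-- ===== PORT A =====
-- _CRITICAL_SIGNALS module constant
def pvCriticalSignals : PySem.Dict String (PySem.Set String) :=
  PySem.Dict.ofList
    [("trading", PySem.Set.ofList ["MT5 dependencies", "Polymarket VPS service"]),
     ("websites", PySem.Set.ofList ["Website availability snapshot", "DNS + TCP(443) reachability"])]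

-- s.get("result") / s["name"] on an assoc-list dict: first match. s["name"] raises KeyError in
-- Python when absent; Pre_ guarantees it is present on every failing signal, so '(…).getD ""' is
-- exact on the admitted inputs.
def compute_status_py (signals : List (List (String × String))) (division : String) : String :=
  let critical := pvCriticalSignals.getD division PySem.Set.empty
  let failing := signals.filter (fun s => s.lookup "result" == some "fail")
  if failing.isEmpty then "GREEN"
  else
    let critical_failures :=
      failing.filter (fun s => PySem.Set.contains critical ((s.lookup "name").getD ""))
    if !critical_failures.isEmpty || failing.length ≥ 2 then "RED" else "AMBER"

-- ===== PORT B =====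
-- severity: pass -> 0, non-critical fail -> 1, critical fail -> 2 (same KeyError caveat as A)
def pvSeverity (critical : PySem.Set String) (s : List (String × String)) : Int :=
  if !(s.lookup "result" == some "fail") then 0
  else if PySem.Set.contains critical ((s.lookup "name").getD "") then 2 else 1

def compute_status_py_alt (signals : List (List (String × String))) (division : String) : String :=
  let critical := pvCriticalSignals.getD division PySem.Set.empty
  let total := (signals.map (pvSeverity critical)).sum
  if total = 0 then "GREEN"
  else if total ≥ 2 then "RED" else "AMBER"

-- ===== PRECONDITION & SPEC =====
-- Pre_ excludes only the inputs on which A raises KeyError: a signal whose "result" is "fail"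
-- but which has no "name" key (B raises KeyError there too).
def Pre_compute_status_py (signals : List (List (String × String))) (division : String) : Prop :=
  ∀ s ∈ signals, s.lookup "result" = some "fail" → (s.lookup "name").isSome
instance (signals : List (List (String × String))) (division : String) : Decidable (Pre_compute_status_py signals division) := by unfold Pre_compute_status_py; infer_instance
def pvWitness_compute_status_py : (List (List (String × String))) × String :=
  ([[("name", "MT5 dependencies"), ("result", "fail")], [("name", "x"), ("result", "pass")]], "trading")

def Spec_compute_status_py (signals : List (List (String × String))) (division : String) (out : String) : Prop := out = compute_status_py_alt signals division
instance (signals : List (List (String × String))) (division : String) (out : String) : Decidable (Spec_compute_status_py signals division out) := by unfold Spec_compute_status_py; infer_instance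

-- ===== CLAIM (what is proved, stated in full; the proofs are below) =====
def Claim_equal_compute_status_py : Prop := ∀ (signals : List (List (String × String))) (division : String), Dom_compute_status_py signals division → Pre_compute_status_py signals division → Spec_compute_status_py signals division (compute_status_py signals division)

-- ===== LEMMAS AND PROOFS =====

-- the total severity = #failing + #critical-failing (filters taken in A's staging)
theorem pv_sum_char (critical : PySem.Set String) (signals : List (List (String × String))) :
    (signals.map (pvSeverity critical)).sum
      = ((signals.filter (fun s => s.lookup "result" == some "fail")).length : Int)
        + (((signals.filter (fun s => s.lookup "result" == some "fail")).filter
              (fun s => PySem.Set.contains critical ((s.lookup "name").getD ""))).length : Int) := by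
  induction signals with
  | nil => simp
  | cons s rest ih =>
    by_cases hf : (s.lookup "result" == some "fail") = true
    · by_cases hc : PySem.Set.contains critical ((s.lookup "name").getD "") = true
      · simp only [List.map_cons, List.sum_cons, pvSeverity, hf, Bool.not_true,
          Bool.false_eq_true, if_false, hc, if_true, ih, List.filter_cons, List.length_cons]
        push_cast; ring
      · have hc' : PySem.Set.contains critical ((s.lookup "name").getD "") = false := by
          simpa using hc
        simp only [List.map_cons, List.sum_cons, pvSeverity, hf, Bool.not_true,
          Bool.false_eq_true, if_false, hc', ih]
        rw [List.filter_cons]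
        simp only [hf, if_true]
        rw [List.filter_cons]
        simp only [hc', Bool.false_eq_true, if_false, List.length_cons]
        push_cast; ring
    · have hf' : (s.lookup "result" == some "fail") = false := by simpa using hf
      simp only [List.map_cons, List.sum_cons, pvSeverity, hf', Bool.not_false, if_true, ih,
        List.filter_cons, Bool.false_eq_true, if_false]
      ring

theorem compute_status_eq (signals : List (List (String × String))) (division : String) :
    compute_status_py signals division = compute_status_py_alt signals division := by
  unfold compute_status_py compute_status_py_alt
  simp only [pv_sum_char]
  set critical := pvCriticalSignals.getD division PySem.Set.empty
  set failing := signals.filter (fun s => s.lookup "result" == some "fail") with hfdef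
  set crit := failing.filter (fun s => PySem.Set.contains critical ((s.lookup "name").getD "")) with hcdef
  have hsub : crit.length ≤ failing.length := by
    simpa [hcdef] using List.length_filter_le
      (fun s => PySem.Set.contains critical ((s.lookup "name").getD "")) failing
  by_cases hempty : failing.isEmpty
  · have h0 : failing.length = 0 := by simp [List.isEmpty_iff.mp hempty]
    have hc0 : crit.length = 0 := by omega
    simp [hempty, h0, hc0]
  · have hne : failing ≠ [] := by simpa [List.isEmpty_iff] using hempty
    have hlen : 1 ≤ failing.length := List.length_pos_of_ne_nil hne
    have hsum0 : ((failing.length : Int) + (crit.length : Int) = 0) = False := by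
      simp only [eq_iff_iff, iff_false]; push_cast; omega
    simp only [hempty, Bool.false_eq_true, if_false, hsum0, if_false]
    by_cases hcne : crit.isEmpty
    · have hc0 : crit.length = 0 := by simp [List.isEmpty_iff.mp hcne]
      by_cases h2 : failing.length ≥ 2
      · have : ((failing.length : Int) + (crit.length : Int) ≥ 2) := by push_cast; omega
        simp [hcne, h2, this]
      · have h1 : failing.length = 1 := by omega
        have : ¬ ((failing.length : Int) + (crit.length : Int) ≥ 2) := by push_cast; omega
        simp [hcne, h2, this]
    · have hc1 : 1 ≤ crit.length := by
        have : crit ≠ [] := by simpa [List.isEmpty_iff] using hcne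
        exact List.length_pos_of_ne_nil this
      have : ((failing.length : Int) + (crit.length : Int) ≥ 2) := by push_cast; omega
      simp [hcne, this]

-- ===== VERDICT (by name: the statement is the Claim_ definition above) =====
theorem compute_status_py_spec : Claim_equal_compute_status_py := by
  intro signals division _ _
  exact compute_status_eq signals division
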